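-- pv_equiv track=rewrite | github.com/lbcb-sci/DipGNNome | decoding/eval.py | get_contig_length
-- ===== SOURCE A (Python) =====
-- def get_contig_length(walk, node_length, overlap_length, nodes=False):
--     """Calculate the length of the sequence that the walk reconstructs."""
--     if nodes:
--         return len(walk)
--     if len(walk)==0:
--         return 0
--     total_length = node_length[walk[0]]
--     if len(walk)==1:
--         return total_length
--     current = walk[0]
--     for next_node in walk[1:]:
--         edge = (current, next_node)
--         total_length += node_length[next_node] - overlap_length[edge]
--         current = next_node
--     return total_length
-- ===== SOURCE B (Python) =====
-- def get_contig_length(walk, node_length, overlap_length, nodes=False):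
--     """Calculate the length of the sequence that the walk reconstructs."""
--     if nodes:
--         return len(walk)
--     if not walk:
--         return 0
--
--     def seg(lo, hi):
--         # Reconstructed length of the sub-walk walk[lo:hi] (requires lo < hi).
--         if hi - lo == 1:
--             return node_length[walk[lo]]
--         mid = (lo + hi) // 2
--         return seg(lo, mid) + seg(mid, hi) - overlap_length[(walk[mid - 1], walk[mid])]
--
--     return seg(0, len(walk))
-- ===== Notes on version B (the rewrite author's own statement) =====
-- stated objective: alternative
-- what changed: Replaces A's left-to-right stateful accumulation (running total plus 'current' node) by a divide-and-conquer recursion: a segment's length is the length of its left half plus its right half minus the overlap at the junction edge; correct because overlaps act independently on each consecutive pair.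
import Mathlib
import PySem

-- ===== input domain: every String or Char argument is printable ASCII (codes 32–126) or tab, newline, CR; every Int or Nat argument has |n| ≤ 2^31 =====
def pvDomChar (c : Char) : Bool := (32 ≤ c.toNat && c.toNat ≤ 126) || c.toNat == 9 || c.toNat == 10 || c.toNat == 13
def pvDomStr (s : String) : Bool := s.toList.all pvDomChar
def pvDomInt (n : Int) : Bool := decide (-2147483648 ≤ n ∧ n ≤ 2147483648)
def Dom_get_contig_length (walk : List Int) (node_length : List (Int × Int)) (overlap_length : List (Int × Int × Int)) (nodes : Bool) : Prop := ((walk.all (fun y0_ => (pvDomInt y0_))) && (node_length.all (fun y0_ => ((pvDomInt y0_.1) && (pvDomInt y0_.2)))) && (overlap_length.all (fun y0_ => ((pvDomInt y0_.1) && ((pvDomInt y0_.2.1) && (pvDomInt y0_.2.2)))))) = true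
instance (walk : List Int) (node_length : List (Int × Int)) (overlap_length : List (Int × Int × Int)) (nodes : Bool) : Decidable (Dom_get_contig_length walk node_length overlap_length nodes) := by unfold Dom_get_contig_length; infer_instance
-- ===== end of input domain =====

-- ===== PORT A =====
-- B replaces A's left-to-right stateful accumulation by a divide-and-conquer recursion
-- (segment length = left half + right half - junction overlap); same cost, different algorithm.
-- Dict lookups: Pre_ guarantees every looked-up key is present, so the getD default 0 is never used
-- (Python raises KeyError on a missing key; those inputs are outside Pre_).
def pvNl (node_length : List (Int × Int)) : PySem.Dict Int Int := PySem.Dict.ofList node_length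
def pvOl (overlap_length : List (Int × Int × Int)) : PySem.Dict (Int × Int) Int :=
  PySem.Dict.ofList (overlap_length.map (fun e => ((e.1, e.2.1), e.2.2)))

def get_contig_length (walk : List Int) (node_length : List (Int × Int)) (overlap_length : List (Int × Int × Int)) (nodes : Bool) : Int :=
  if nodes then (walk.length : Int)
  else
    match walk with
    | [] => 0
    | w0 :: rest =>
      let total := (pvNl node_length).getD w0 0
      if rest = [] then total
      else
        (rest.foldl
          (fun (s : Int × Int) nx =>
            (s.1 + (pvNl node_length).getD nx 0 - (pvOl overlap_length).getD (s.2, nx) 0, nx))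
          (total, w0)).1

-- ===== PORT B =====
-- pvSeg fuel lo hi = reconstructed length of walk[lo:hi]; the fuel argument and the 'hi ≤ lo + 1'
-- base case only make Python's recursion (base 'hi - lo == 1') total: in-domain calls always have
-- lo < hi and hi - lo ≤ fuel + 1, where the two coincide.
def pvSeg (walk : List Int) (nl : PySem.Dict Int Int) (ol : PySem.Dict (Int × Int) Int) : Nat → Nat → Nat → Int
  | 0, lo, _ => nl.getD (walk.getD lo 0) 0
  | fuel + 1, lo, hi =>
    if hi ≤ lo + 1 then nl.getD (walk.getD lo 0) 0
    else
      let mid := (lo + hi) / 2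
      pvSeg walk nl ol fuel lo mid + pvSeg walk nl ol fuel mid hi
        - ol.getD (walk.getD (mid - 1) 0, walk.getD mid 0) 0

def get_contig_length_alt (walk : List Int) (node_length : List (Int × Int)) (overlap_length : List (Int × Int × Int)) (nodes : Bool) : Int :=
  if nodes then (walk.length : Int)
  else if walk = [] then 0
  else pvSeg walk (pvNl node_length) (pvOl overlap_length) walk.length 0 walk.length

-- ===== PRECONDITION & SPEC =====
-- Pre_ excludes exactly the inputs where Python A raises KeyError: when nodes is false,
-- every walk node must be a key of node_length and every consecutive pair a key of overlap_length.
def Pre_get_contig_length (walk : List Int) (node_length : List (Int × Int)) (overlap_length : List (Int × Int × Int)) (nodes : Bool) : Prop :=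
  nodes = true ∨
    ((∀ w ∈ walk, w ∈ node_length.map Prod.fst) ∧
     (∀ e ∈ walk.zip walk.tail, e ∈ overlap_length.map (fun t => (t.1, t.2.1))))
instance (walk : List Int) (node_length : List (Int × Int)) (overlap_length : List (Int × Int × Int)) (nodes : Bool) : Decidable (Pre_get_contig_length walk node_length overlap_length nodes) := by unfold Pre_get_contig_length; infer_instance

def pvWitness_get_contig_length : List Int × (List (Int × Int)) × (List (Int × Int × Int)) × Bool :=
  ([0, 1], [(0, 5), (1, 7)], [(0, 1, 2)], false)

def Spec_get_contig_length (walk : List Int) (node_length : List (Int × Int)) (overlap_length : List (Int × Int × Int)) (nodes : Bool) (out : Int) : Prop := out = get_contig_length_alt walk node_length overlap_length nodes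
instance (walk : List Int) (node_length : List (Int × Int)) (overlap_length : List (Int × Int × Int)) (nodes : Bool) (out : Int) : Decidable (Spec_get_contig_length walk node_length overlap_length nodes out) := by unfold Spec_get_contig_length; infer_instance

-- ===== CLAIM (what is proved, stated in full; the proofs are below) =====
def Claim_equal_get_contig_length : Prop := ∀ (walk : List Int) (node_length : List (Int × Int)) (overlap_length : List (Int × Int × Int)) (nodes : Bool), Dom_get_contig_length walk node_length overlap_length nodes → Pre_get_contig_length walk node_length overlap_length nodes → Spec_get_contig_length walk node_length overlap_length nodes (get_contig_length walk node_length overlap_length nodes)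

-- ===== LEMMAS AND PROOFS =====

-- The common target: sum of node lengths minus sum of overlaps on consecutive pairs.
def pvF (nv : Int → Int) (ov : Int × Int → Int) (xs : List Int) : Int :=
  (xs.map nv).sum - ((xs.zip xs.tail).map ov).sum

theorem pvF_cons (nv : Int → Int) (ov : Int × Int → Int) (a b : Int) (t : List Int) :
    pvF nv ov (a :: b :: t) = nv a - ov (a, b) + pvF nv ov (b :: t) := by
  simp [pvF]; ring

theorem pvF_append (nv : Int → Int) (ov : Int × Int → Int) :
    ∀ (xs : List Int) (hx : xs ≠ []) (ys : List Int) (hy : ys ≠ []),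
      pvF nv ov (xs ++ ys)
        = pvF nv ov xs + pvF nv ov ys - ov (xs.getLast hx, ys.head hy) := by
  intro xs
  induction xs with
  | nil => intro h; exact absurd rfl h
  | cons a t ih =>
    intro _ ys hy
    cases t with
    | nil =>
      cases ys with
      | nil => exact absurd rfl hy
      | cons y yt => simp [pvF]; ring
    | cons b t' =>
      have h2 : (b :: t') ≠ [] := by simp
      have : (a :: b :: t') ++ ys = a :: b :: (t' ++ ys) := by simp
      rw [this]
      have hjoin : (b :: (t' ++ ys)) = (b :: t') ++ ys := by simp
      rw [pvF_cons, hjoin, ih h2 ys hy, pvF_cons]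
      simp [List.getLast_cons h2]
      ring

theorem pvSeg_eq (walk : List Int) (nl : PySem.Dict Int Int) (ol : PySem.Dict (Int × Int) Int) :
    ∀ (fuel lo hi : Nat), lo < hi → hi ≤ walk.length → hi - lo ≤ fuel + 1 →
      pvSeg walk nl ol fuel lo hi
        = pvF (fun w => nl.getD w 0) (fun e => ol.getD e 0) ((walk.drop lo).take (hi - lo)) := by
  intro fuel
  induction fuel with
  | zero =>
    intro lo hi hlt hle hf
    have h1 : hi - lo = 1 := by omega
    have hlo : lo < walk.length := by omega
    have htk : (walk.drop lo).take 1 = [walk[lo]] := by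
      rw [List.drop_eq_getElem_cons hlo, List.take_succ_cons, List.take_zero]
    rw [pvSeg, h1, htk]
    simp [pvF, List.getD_eq_getElem?_getD, hlo]
  | succ fuel ih =>
    intro lo hi hlt hle hf
    by_cases hbase : hi ≤ lo + 1
    · have h1 : hi - lo = 1 := by omega
      have hlo : lo < walk.length := by omega
      have htk : (walk.drop lo).take 1 = [walk[lo]] := by
        rw [List.drop_eq_getElem_cons hlo, List.take_succ_cons, List.take_zero]
      rw [pvSeg, if_pos hbase, h1, htk]
      simp [pvF, List.getD_eq_getElem?_getD, hlo]
    · rw [pvSeg, if_neg hbase]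
      have hmidlt : lo < (lo + hi) / 2 ∧ (lo + hi) / 2 < hi := by omega
      set mid := (lo + hi) / 2 with hmid
      have e1 := ih lo mid hmidlt.1 (by omega) (by omega)
      have e2 := ih mid hi hmidlt.2 hle (by omega)
      simp only [e1, e2]
      have hsplit : (walk.drop lo).take (hi - lo)
          = (walk.drop lo).take (mid - lo) ++ (walk.drop mid).take (hi - mid) := by
        have h1 : hi - lo = (mid - lo) + (hi - mid) := by omega
        rw [h1, List.take_add]
        congr 1
        rw [List.drop_drop]
        have hm : lo + (mid - lo) = mid := by omega
        rw [hm]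
      have hx : (walk.drop lo).take (mid - lo) ≠ [] := by
        have : ((walk.drop lo).take (mid - lo)).length = mid - lo := by
          simp; omega
        intro h; rw [h] at this; simp at this; omega
      have hy : (walk.drop mid).take (hi - mid) ≠ [] := by
        have : ((walk.drop mid).take (hi - mid)).length = hi - mid := by
          simp; omega
        intro h; rw [h] at this; simp at this; omega
      rw [hsplit, pvF_append _ _ _ hx _ hy]
      have hlen : ((walk.drop lo).take (mid - lo)).length = mid - lo := by simp; omega
      have hlast : ((walk.drop lo).take (mid - lo)).getLast hx = walk.getD (mid - 1) 0 := by
        rw [List.getLast_eq_getElem]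
        have hm1 : mid - 1 < walk.length := by omega
        simp only [hlen]
        rw [List.getElem_take, List.getElem_drop]
        rw [List.getD_eq_getElem?_getD]
        simp [hm1]
        congr 1; omega
      have hhead : ((walk.drop mid).take (hi - mid)).head hy = walk.getD mid 0 := by
        rw [List.head_eq_getElem]
        have hm : mid < walk.length := by omega
        rw [List.getElem_take, List.getElem_drop]
        rw [List.getD_eq_getElem?_getD]
        simp [hm]
      rw [hlast, hhead]

theorem pvFold_eq (nv : Int → Int) (ov : Int × Int → Int) :
    ∀ (rest : List Int) (c t : Int),
      (rest.foldl (fun (s : Int × Int) nx => (s.1 + nv nx - ov (s.2, nx), nx)) (t, c)).1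
        = t + (rest.map nv).sum - (((c :: rest).zip rest).map ov).sum := by
  intro rest
  induction rest with
  | nil => intro c t; simp
  | cons r rs ih =>
    intro c t
    simp only [List.foldl_cons, List.zip_cons_cons, List.map_cons, List.sum_cons, ih]
    ring

-- ===== VERDICT (by name: the statement is the Claim_ definition above) =====
theorem get_contig_length_spec : Claim_equal_get_contig_length := by
  intro walk node_length overlap_length nodes _ _
  unfold Spec_get_contig_length get_contig_length get_contig_length_alt
  cases nodes with
  | true => simp
  | false =>
    simp only [Bool.false_eq_true, if_false]
    cases walk with
    | nil => simp
    | cons w0 rest =>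
      have hne : (w0 :: rest) ≠ [] := by simp
      rw [if_neg hne]
      rw [pvSeg_eq (w0 :: rest) (pvNl node_length) (pvOl overlap_length)
            (w0 :: rest).length 0 (w0 :: rest).length (by simp) le_rfl (by omega)]
      simp only [List.drop_zero, List.take_length, Nat.sub_zero]
      cases rest with
      | nil => simp [pvF]
      | cons r rs =>
        simp only [reduceCtorEq, if_false]
        rw [pvFold_eq (fun w => (pvNl node_length).getD w 0)
              (fun e => (pvOl overlap_length).getD e 0)]
        simp only [pvF, List.tail_cons, List.map_cons, List.sum_cons]
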